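-- pv_equiv track=rewrite | github.com/stephen-huan/dotfiles | bin/far.py | parse_prefix
-- ===== SOURCE A (Python) =====
-- PREFIX = set(" >:-*|#$%'\"") # characters allowed to be in a prefix
--
-- def parse_prefix(lines: list) -> tuple:
--     """ Parses lines into a list of tokens, taking into account prefixes. """
--     # find prefix, where a prefix is defined as a series
--     # of the same character, if the character is in PREFIX
--     prefix = []
--     smallest = min(map(len, lines))
--     for ch in range(smallest):
--         for line in lines:
--             if line[ch] != lines[0][ch] or line[ch] not in PREFIX:
--                 break
--         else:
--             prefix.append(lines[0][ch])
--             continue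
--         break
--     prefix = "".join(prefix)
--
--     par = []
--     for line in lines:
--         par += line[len(prefix):].split()
--
--     return par, prefix
-- ===== SOURCE B (Python) =====
-- PREFIX = set(" >:-*|#$%'\"") # characters allowed to be in a prefix
--
-- def parse_prefix(lines: list) -> tuple:
--     """ Parses lines into a list of tokens, taking into account prefixes. """
--     # row-major: per line, length of its longest run of prefix chars
--     # matching lines[0]; the common prefix length is the running minimum.
--     smallest = min(len(line) for line in lines)
--     first = lines[0]
--     k = smallest
--     for line in lines:
--         j = 0
--         while j < k and line[j] == first[j] and line[j] in PREFIX: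
--             j += 1
--         k = j
--     prefix = first[:k]
--     par = [tok for line in lines for tok in line[k:].split()]
--     return par, prefix
-- ===== Notes on version B (the rewrite author's own statement) =====
-- stated objective: alternative
-- what changed: Replaces A's column-major nested loop (for each position, scan all lines with for/else break) by a row-major scheme: each line is scanned once for its longest PREFIX-run matching lines[0], the common prefix length is the running minimum (capped by the shortest line), and tokens come from a single flat comprehension instead of repeated list +=.
import Mathlib
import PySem

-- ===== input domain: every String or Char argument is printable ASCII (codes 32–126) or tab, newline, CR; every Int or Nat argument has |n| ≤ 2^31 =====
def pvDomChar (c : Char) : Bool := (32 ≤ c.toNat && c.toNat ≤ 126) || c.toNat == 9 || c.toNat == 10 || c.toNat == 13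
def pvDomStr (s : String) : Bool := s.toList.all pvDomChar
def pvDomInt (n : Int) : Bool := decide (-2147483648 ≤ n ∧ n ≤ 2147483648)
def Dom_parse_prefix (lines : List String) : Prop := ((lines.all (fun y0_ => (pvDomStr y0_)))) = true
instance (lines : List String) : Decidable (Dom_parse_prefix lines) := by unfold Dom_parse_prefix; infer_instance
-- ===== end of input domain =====

-- B recomputes the common prefix row-major (per-line scan + running minimum) instead of A's
-- column-major nested loop, and flattens tokens with flatMap instead of repeated append; same cost.

-- characters allowed to be in a prefix (the module constant PREFIX)
def pvPrefixChars : List Char := " >:-*|#$%'\"".toList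

-- ===== PORT A =====
-- inner 'for line in lines: … break / else:' — true iff no line breaks at column ch
def pvA_col (lines : List String) (first : String) (ch : Nat) : Bool :=
  lines.all (fun line =>
    (line.toList.getD ch ' ' == first.toList.getD ch ' ') &&
    pvPrefixChars.contains (line.toList.getD ch ' '))

-- outer 'for ch in range(smallest): … break', accumulating the prefix chars
def pvA_loop (lines : List String) (first : String) (s : Nat) (ch : Nat) (acc : List Char) : List Char :=
  if _h : ch < s then
    if pvA_col lines first ch then
      pvA_loop lines first s (ch + 1) (acc ++ [first.toList.getD ch ' '])
    else acc
  else acc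
termination_by s - ch

def parse_prefix (lines : List String) : List String × String :=
  let first := lines.headD ""
  let smallest := ((lines.map (fun l => l.toList.length)).min?).getD 0  -- min() raises on []; Pre_ excludes
  let pfx := pvA_loop lines first smallest 0 []
  let par := lines.foldl
    (fun par line => par ++ PySem.Str.split₀ (PySem.Str.slice line (some (pfx.length : Int)) none)) []
  (par, String.ofList pfx)

-- ===== PORT B =====
-- 'while j < k and line[j] == first[j] and line[j] in PREFIX: j += 1'
def pvB_scan (first line : List Char) (k j : Nat) : Nat :=
  if _h : j < k then
    if (line.getD j ' ' == first.getD j ' ') && pvPrefixChars.contains (line.getD j ' ') then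
      pvB_scan first line k (j + 1)
    else j
  else j
termination_by k - j

def parse_prefix_alt (lines : List String) : List String × String :=
  let first := lines.headD ""
  let smallest := ((lines.map (fun l => l.toList.length)).min?).getD 0  -- min() raises on []; Pre_ excludes
  let k := lines.foldl (fun k line => pvB_scan first.toList line.toList k 0) smallest
  let par := lines.flatMap (fun line => PySem.Str.split₀ (PySem.Str.slice line (some (k : Int)) none))
  (par, String.ofList (first.toList.take k))

-- ===== PRECONDITION & SPEC =====
-- A raises ValueError on the empty list (min of an empty sequence); B raises there too.
def Pre_parse_prefix (lines : List String) : Prop := lines ≠ []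
instance (lines : List String) : Decidable (Pre_parse_prefix lines) := by
  unfold Pre_parse_prefix; infer_instance
def pvWitness_parse_prefix : List String := ["> a b", "> c"]

def Spec_parse_prefix (lines : List String) (out : List String × String) : Prop := out = parse_prefix_alt lines
instance (lines : List String) (out : List String × String) : Decidable (Spec_parse_prefix lines out) := by unfold Spec_parse_prefix; infer_instance

-- ===== CLAIM (what is proved, stated in full; the proofs are below) =====
def Claim_equal_parse_prefix : Prop := ∀ (lines : List String), Dom_parse_prefix lines → Pre_parse_prefix lines → Spec_parse_prefix lines (parse_prefix lines)

-- ===== LEMMAS AND PROOFS =====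

-- the per-(line, column) condition both loops test
def pvCond (first line : List Char) (j : Nat) : Bool :=
  (line.getD j ' ' == first.getD j ' ') && pvPrefixChars.contains (line.getD j ' ')

-- B's while-loop: result r satisfies j ≤ r ≤ k, all columns below r pass, and it stopped for a reason
lemma pvB_scan_spec (first line : List Char) (k j : Nat) (hj : j ≤ k) :
    j ≤ pvB_scan first line k j ∧ pvB_scan first line k j ≤ k ∧
    (∀ i, j ≤ i → i < pvB_scan first line k j → pvCond first line i = true) ∧
    (pvB_scan first line k j = k ∨ pvCond first line (pvB_scan first line k j) = false) := by
  fun_induction pvB_scan first line k j with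
  | case1 j h hc ih =>
    obtain ⟨ih1, ih2, ih3, ih4⟩ := ih (by omega)
    refine ⟨by omega, ih2, ?_, ih4⟩
    intro i hi1 hi2
    rcases Nat.eq_or_lt_of_le hi1 with rfl | hlt
    · simpa [pvCond] using hc
    · exact ih3 i hlt hi2
  | case2 j h hc =>
    exact ⟨le_refl _, by omega, fun i h1 h2 => by omega, Or.inr (by simpa [pvCond] using hc)⟩
  | case3 j h =>
    exact ⟨le_refl _, by omega, fun i h1 h2 => by omega, Or.inl (by omega)⟩

-- the "stopping point" of the whole prefix search, and its uniqueness
def pvStop (lines : List String) (first : String) (s N : Nat) : Prop :=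
  N ≤ s ∧ (∀ l ∈ lines, ∀ i < N, pvCond first.toList l.toList i = true) ∧
  (N = s ∨ ∃ l ∈ lines, pvCond first.toList l.toList N = false)

lemma pvStop_unique {lines : List String} {first : String} {s N1 N2 : Nat}
    (h1 : pvStop lines first s N1) (h2 : pvStop lines first s N2) : N1 = N2 := by
  obtain ⟨a1, b1, c1⟩ := h1
  obtain ⟨a2, b2, c2⟩ := h2
  by_contra hne
  rcases Nat.lt_or_ge N1 N2 with h | h
  · rcases c1 with rfl | ⟨l, hl, hf⟩
    · omega
    · have := b2 l hl N1 h; simp [this] at hf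
  · have h' : N2 < N1 := by omega
    rcases c2 with rfl | ⟨l, hl, hf⟩
    · omega
    · have := b1 l hl N2 h'; simp [this] at hf

-- B's fold over the lines reaches a stopping point (invariant over the processed lines)
lemma pvB_fold_aux (lines : List String) (first : String) (s : Nat) :
    ∀ (done : List String) (k : Nat), k ≤ s →
    (∀ l ∈ done, ∀ i < k, pvCond first.toList l.toList i = true) →
    (k = s ∨ ∃ l ∈ done, pvCond first.toList l.toList k = false) →
    pvStop (done ++ lines) first s
      (lines.foldl (fun k line => pvB_scan first.toList line.toList k 0) k) := by
  induction lines with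
  | nil =>
    intro done k hk hall hstop
    simp only [List.foldl_nil, List.append_nil]
    exact ⟨hk, hall, hstop⟩
  | cons l ls ih =>
    intro done k hk hall hstop
    simp only [List.foldl_cons]
    obtain ⟨s1, s2, s3, s4⟩ := pvB_scan_spec first.toList l.toList k 0 (Nat.zero_le k)
    set k' := pvB_scan first.toList l.toList k 0 with hk'
    have h := ih (done ++ [l]) k' (le_trans s2 hk) ?_ ?_
    · simpa [List.append_assoc] using h
    · intro x hx i hi
      rcases List.mem_append.mp hx with hx | hx
      · exact hall x hx i (by omega)
      · simp at hx; subst hx; exact s3 i (Nat.zero_le i) hi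
    · rcases s4 with heq | hf
      · rcases hstop with rfl | ⟨x, hx, hf⟩
        · left; omega
        · right; exact ⟨x, List.mem_append_left _ hx, by rwa [heq]⟩
      · right; exact ⟨l, by simp, hf⟩

lemma pvB_fold_stop (lines : List String) (first : String) (k : Nat) :
    pvStop lines first k (lines.foldl (fun k line => pvB_scan first.toList line.toList k 0) k) := by
  have := pvB_fold_aux lines first k [] k (le_refl _) (by simp) (Or.inl rfl)
  simpa using this

-- A's loop from column ch appends exactly the run of passing columns
lemma pvA_loop_spec (lines : List String) (first : String) (s : Nat) :
    ∀ ch acc, ch ≤ s →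
    ∃ N, pvA_loop lines first s ch acc
        = acc ++ (List.range' ch N).map (fun i => first.toList.getD i ' ') ∧
      ch + N ≤ s ∧ (∀ i, ch ≤ i → i < ch + N → pvA_col lines first i = true) ∧
      (ch + N = s ∨ pvA_col lines first (ch + N) = false) := by
  intro ch acc hch
  fun_induction pvA_loop lines first s ch acc with
  | case1 ch acc h hc ih =>
    obtain ⟨N, e1, e2, e3, e4⟩ := ih (by omega)
    refine ⟨N + 1, ?_, by omega, ?_, ?_⟩
    · rw [e1, List.range'_succ, List.map_cons]
      simp
    · intro i h1 h2
      rcases Nat.eq_or_lt_of_le h1 with rfl | hlt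
      · exact hc
      · exact e3 i hlt (by omega)
    · rcases e4 with he | hf
      · left; omega
      · right; have : ch + (N + 1) = ch + 1 + N := by omega
        rwa [this]
  | case2 ch acc h hc =>
    exact ⟨0, by simp, by omega, fun i h1 h2 => by omega, Or.inr (by simpa using hc)⟩
  | case3 ch acc h =>
    exact ⟨0, by simp, by omega, fun i h1 h2 => by omega, Or.inl (by omega)⟩

-- A's column test is the conjunction over lines of the shared per-line condition
lemma pvA_col_eq (lines : List String) (first : String) (i : Nat) :
    pvA_col lines first i = lines.all (fun l => pvCond first.toList l.toList i) := by
  rfl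

lemma pv_take_eq_map_range' (l : List Char) (N : Nat) (h : N ≤ l.length) :
    (List.range' 0 N).map (fun i => l.getD i ' ') = l.take N := by
  apply List.ext_getElem
  · simp [h]
  · intro i h1 h2
    simp at h1
    simp [List.getElem_range', List.getD_eq_getElem?_getD, List.getElem?_eq_getElem (by omega : i < l.length)]

-- ===== VERDICT (by name: the statement is the Claim_ definition above) =====
theorem parse_prefix_spec : Claim_equal_parse_prefix := by
  intro lines _dom hpre
  unfold Spec_parse_prefix parse_prefix parse_prefix_alt
  simp only
  set first := lines.headD "" with hfirst
  set s := ((lines.map (fun l => l.toList.length)).min?).getD 0 with hs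
  obtain ⟨N, e1, e2, e3, e4⟩ := pvA_loop_spec lines first s 0 [] (Nat.zero_le s)
  simp only [Nat.zero_add] at e1 e2 e3 e4
  have hstopA : pvStop lines first s N := by
    refine ⟨e2, ?_, ?_⟩
    · intro l hl i hi
      have := e3 i (Nat.zero_le i) hi
      rw [pvA_col_eq, List.all_eq_true] at this
      exact this l hl
    · rcases e4 with he | hf
      · exact Or.inl he
      · right
        rw [pvA_col_eq, List.all_eq_false] at hf
        obtain ⟨l, hl, hc⟩ := hf
        exact ⟨l, hl, by simpa using hc⟩
  have hNk := pvStop_unique hstopA (pvB_fold_stop lines first s)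
  have hsle : s ≤ first.toList.length := by
    cases lines with
    | nil => exact absurd rfl hpre
    | cons l rest =>
      have hmem : l.toList.length ∈ ((l :: rest).map (fun l => l.toList.length)) := by simp
      cases hmin : ((l :: rest).map (fun l => l.toList.length)).min? with
      | none => simp at hmin
      | some m =>
        have hmle : m ≤ l.toList.length := by
          rw [List.min?_eq_some_iff] at hmin
          · exact hmin.2 _ hmem
        have hsm : s = m := by rw [hs, hmin]; rfl
        have hfl : first = l := by rw [hfirst]; rfl
        rw [hsm, hfl]; exact hmle
  rw [← hNk]
  refine Prod.ext ?_ ?_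
  · simp only [e1, List.nil_append]
    rw [PySem.List.foldl_append_eq_flatMap]
    simp
  · simp only [e1, List.nil_append]
    rw [pv_take_eq_map_range' first.toList N (by omega)]
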